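-- pv_equiv track=rewrite | github.com/bcmeireles/Buggy-Data-Base | bdb.py | get_pin
-- ===== SOURCE A (Python) =====
-- moves = {1:{"R":2, "L": 1, "U":1, "D":4},2:{"R":3, "L": 1, "U":2, "D":5},3:{"R":3, "L": 2, "U":3, "D":6},4:{"R":5, "L": 4, "U":1, "D":7},5:{"R":6, "L": 4, "U":2, "D":8},6:{"R":6, "L": 5, "U":3, "D":9},7:{"R":8, "L": 7, "U":4, "D":7},8:{"R":9, "L": 7, "U":5, "D":8},9:{"R":9, "L": 8, "U":6, "D":9}}
--
-- def get_position(chain, integrer):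
--     """
--     Receives a string with only one character that represents the direction of the movement and a number, which represents
--     the current position
--
--     Using a dictionary moves, returns the position after the move
--
--     str x int --> int
--
--     """
--     return moves[integrer][chain]
--
-- def get_digit(seq, initial):
--     """
--     Receives a string with one or more characters and also a number, representing the initial position
--
--     Using the same dictionary moves, returns the position after going through all moves
--
--     str x int --> int
--     """
--
--     current = initial
--     for move in seq:
--         current = get_position(move, current)
--
--     return current
--
-- def get_pin(tup):
--     """
--     Receives a tuple with 4 to 10 move sequences and returns a tuple with the correct PIN, according to those sequences
--
--     It validates the given argument, where each element contains at least one character and it must be "U", "D", "L" or "R"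
--
--     tuple --> tuple
--     """
--
--     if type(tup) != tuple:
--         raise ValueError('get_pin: invalid argument')
--
--     for element in tup:
--         if type(element) != str:
--             raise ValueError('get_pin: invalid argument')
--
--         for letter in element:
--             if letter not in ["U", "D", "L", "R"]:
--                 raise ValueError('get_pin: invalid argument')
--
--     if not 4 <= len(tup) <= 10:
--         raise ValueError('get_pin: invalid argument')
--
--     for i in range(len(tup)):
--         if len(tup[i]) < 1:
--             raise ValueError('get_pin: invalid argument')
--         if not tup[i].isalpha():
--             raise ValueError('get_pin: invalid argument')
--
--
--     values = []
--
--     for i in range(len(tup)):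
--         if i == 0:
--             current = get_digit(tup[i], 5) # assumes the initial position is the number 5
--
--         else:
--             current = get_digit(tup[i], current)
--
--         values.append(current)
--
--     return tuple(values)
-- ===== SOURCE B (Python) =====
-- def get_pin(tup):
--     """PIN via per-sequence full transition tables (all 9 start digits at once), then table chaining."""
--     if type(tup) != tuple:
--         raise ValueError('get_pin: invalid argument')
--     if not 4 <= len(tup) <= 10:
--         raise ValueError('get_pin: invalid argument')
--     for seq in tup:
--         if type(seq) != str or not seq or any(ch not in "UDLR" for ch in seq):
--             raise ValueError('get_pin: invalid argument')
--
--     def step(d, ch):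
--         r, c = divmod(d - 1, 3)
--         if ch == "R":
--             c = min(c + 1, 2)
--         elif ch == "L":
--             c = max(c - 1, 0)
--         elif ch == "U":
--             r = max(r - 1, 0)
--         else:
--             r = min(r + 1, 2)
--         return r * 3 + c + 1
--
--     # Stage 1: for each sequence compute its whole transition function as a 9-entry table.
--     tables = []
--     for seq in tup:
--         tbl = list(range(1, 10))
--         for ch in seq:
--             tbl = [step(d, ch) for d in tbl]
--         tables.append(tbl)
--
--     # Stage 2: chain the tables starting from digit 5.
--     pin = []
--     cur = 5
--     for tbl in tables:
--         cur = tbl[cur - 1]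
--         pin.append(cur)
--     return tuple(pin)
-- ===== Notes on version B (the rewrite author's own statement) =====
-- stated objective: alternative
-- what changed: Instead of simulating one running position move-by-move with the moves dict, B computes for each sequence its entire transition function as a 9-entry table (applying each move to all 9 keypad digits simultaneously via clamped row/column arithmetic) and then derives the PIN in a second stage by chaining these tables from digit 5; validation is merged into one pass since all failures raise the same ValueError.
import Mathlib
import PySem

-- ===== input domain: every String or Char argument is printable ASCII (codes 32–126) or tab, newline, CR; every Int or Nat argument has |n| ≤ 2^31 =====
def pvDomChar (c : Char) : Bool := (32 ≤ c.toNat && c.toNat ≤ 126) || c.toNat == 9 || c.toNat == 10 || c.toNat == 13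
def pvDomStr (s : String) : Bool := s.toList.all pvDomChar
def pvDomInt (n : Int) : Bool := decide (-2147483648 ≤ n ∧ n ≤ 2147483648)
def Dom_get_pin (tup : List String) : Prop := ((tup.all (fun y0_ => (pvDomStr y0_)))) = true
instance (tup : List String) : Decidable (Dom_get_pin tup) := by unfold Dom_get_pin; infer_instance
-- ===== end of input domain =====

-- B replaces A's single-position simulation over the 36-entry `moves` dict by a two-stage algorithm:
-- per-sequence 9-entry transition tables (all start digits at once), then chaining of the tables; objective: alternative.
-- A raises ValueError on invalid input; those inputs are excluded by Pre_get_pin (the ports return [] there, nothing is claimed).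

-- ===== PORT A =====
-- the module-level `moves` dictionary, transliterated (inner keys are the one-char move strings, as Char)
def pvMoves : PySem.Dict Int (PySem.Dict Char Int) :=
  PySem.Dict.ofList
    [ (1, PySem.Dict.ofList [('R',2),('L',1),('U',1),('D',4)])
    , (2, PySem.Dict.ofList [('R',3),('L',1),('U',2),('D',5)])
    , (3, PySem.Dict.ofList [('R',3),('L',2),('U',3),('D',6)])
    , (4, PySem.Dict.ofList [('R',5),('L',4),('U',1),('D',7)])
    , (5, PySem.Dict.ofList [('R',6),('L',4),('U',2),('D',8)])
    , (6, PySem.Dict.ofList [('R',6),('L',5),('U',3),('D',9)])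
    , (7, PySem.Dict.ofList [('R',8),('L',7),('U',4),('D',7)])
    , (8, PySem.Dict.ofList [('R',9),('L',7),('U',5),('D',8)])
    , (9, PySem.Dict.ofList [('R',9),('L',8),('U',6),('D',9)]) ]

-- moves[integrer][chain]; a KeyError (impossible inside Pre_) is rendered as the default 0
def get_position (chain : Char) (integrer : Int) : Int :=
  (pvMoves.getD integrer PySem.Dict.empty).getD chain 0

def get_digit (seq : String) (initial : Int) : Int :=
  seq.toList.foldl (fun current move => get_position move current) initial

-- the `values` loop: `current` starts at 5 (the i == 0 branch) and is threaded through
def pvGetPinLoopA : List String → Int → List Int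
  | [], _ => []
  | s :: rest, current =>
      let c := get_digit s current
      c :: pvGetPinLoopA rest c

def get_pin (tup : List String) : List Int :=
  -- A's validation: every char is U/D/L/R, 4 ≤ len ≤ 10, every element nonempty and isalpha;
  -- on failure A raises ValueError (here: []); excluded by Pre_get_pin
  if (tup.all fun s => s.toList.all fun c => decide (c ∈ (['U','D','L','R'] : List Char))) &&
     (decide (4 ≤ tup.length) && decide (tup.length ≤ 10)) &&
     (tup.all fun s => decide (1 ≤ PySem.Str.len s) && PySem.Str.strIsalpha s)
  then pvGetPinLoopA tup 5
  else []

-- ===== PORT B =====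
-- Source B's `step(d, ch)`: digit → (row, col) via divmod, clamp one coordinate, back to a digit
def pvStepB (d : Int) (ch : Char) : Int :=
  let r := PySem.Int.floordiv (d - 1) 3
  let c := PySem.Int.mod (d - 1) 3
  if ch = 'R' then r * 3 + min (c + 1) 2 + 1
  else if ch = 'L' then r * 3 + max (c - 1) 0 + 1
  else if ch = 'U' then (max (r - 1) 0) * 3 + c + 1
  else (min (r + 1) 2) * 3 + c + 1

-- Stage 1: the whole transition function of one sequence as a 9-entry table
def pvTableB (seq : String) : List Int :=
  seq.toList.foldl (fun tbl ch => tbl.map (fun d => pvStepB d ch)) (PySem.List.pyRange 1 10 1)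

-- Stage 2: chain the tables starting from digit 5 (tbl[cur-1]; index proven in range inside Pre_)
def pvChainB : List (List Int) → Int → List Int
  | [], _ => []
  | tbl :: rest, cur =>
      let cur' := (PySem.List.pyGet? tbl (cur - 1)).getD 0
      cur' :: pvChainB rest cur'

def get_pin_alt (tup : List String) : List Int :=
  if (decide (4 ≤ tup.length) && decide (tup.length ≤ 10)) &&
     (tup.all fun s => !s.toList.isEmpty && (s.toList.all fun c => decide (c ∈ (['U','D','L','R'] : List Char))))
  then pvChainB (tup.map pvTableB) 5
  else []

-- ===== PRECONDITION & SPEC =====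
-- Pre_ excludes exactly the inputs on which A raises ValueError: wrong length, an empty element, or a character other than U/D/L/R.
def Pre_get_pin (tup : List String) : Prop :=
  4 ≤ tup.length ∧ tup.length ≤ 10 ∧
  (tup.all fun s => !s.toList.isEmpty &&
     s.toList.all fun c => decide (c = 'U' ∨ c = 'D' ∨ c = 'L' ∨ c = 'R')) = true
instance (tup : List String) : Decidable (Pre_get_pin tup) := by unfold Pre_get_pin; infer_instance

def pvWitness_get_pin : List String := ["UD", "LLR", "D", "RRUU"]

def Spec_get_pin (tup : List String) (out : List Int) : Prop := out = get_pin_alt tup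
instance (tup : List String) (out : List Int) : Decidable (Spec_get_pin tup out) := by unfold Spec_get_pin; infer_instance

-- ===== CLAIM (what is proved, stated in full; the proofs are below) =====
def Claim_equal_get_pin : Prop := ∀ (tup : List String), Dom_get_pin tup → Pre_get_pin tup → Spec_get_pin tup (get_pin tup)

-- ===== LEMMAS AND PROOFS =====

-- applying a whole sequence in A's fashion, on List Char (get_digit restated)
def pvApplyA (cs : List Char) (d : Int) : Int :=
  cs.foldl (fun current move => get_position move current) d

lemma pvPre_elim (tup : List String) (h : Pre_get_pin tup) :
    4 ≤ tup.length ∧ tup.length ≤ 10 ∧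
    ∀ s ∈ tup, s.toList ≠ [] ∧ ∀ c ∈ s.toList, c ∈ (['U','D','L','R'] : List Char) := by
  obtain ⟨h1, h2, h3⟩ := h
  refine ⟨h1, h2, fun s hs => ?_⟩
  simp only [List.all_eq_true, Bool.and_eq_true, decide_eq_true_eq] at h3
  obtain ⟨hne, hcs⟩ := h3 s hs
  exact ⟨by simpa using hne, fun c hc => by rcases hcs c hc with h | h | h | h <;> simp [h]⟩

-- the 36 transitions of B's step agree with A's `moves` lookup, and stay inside 1..9
lemma pvStepB_eq (d : Int) (h1 : 1 ≤ d) (h9 : d ≤ 9) (ch : Char)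
    (hch : ch ∈ (['U','D','L','R'] : List Char)) :
    pvStepB d ch = get_position ch d ∧ 1 ≤ pvStepB d ch ∧ pvStepB d ch ≤ 9 := by
  interval_cases d <;> fin_cases hch <;> exact ⟨by decide, by decide, by decide⟩

-- Stage-1 invariant: folding the moves over a table of digits maps pvApplyA pointwise
lemma pvTable_fold (cs : List Char) (hcs : ∀ c ∈ cs, c ∈ (['U','D','L','R'] : List Char)) :
    ∀ L : List Int, (∀ d ∈ L, 1 ≤ d ∧ d ≤ 9) →
      cs.foldl (fun tbl ch => tbl.map (fun d => pvStepB d ch)) L = L.map (pvApplyA cs) := by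
  induction cs with
  | nil =>
      intro L _
      simp only [List.foldl_nil]
      exact ((List.map_congr_left (fun d _ => rfl)).trans (List.map_id L)).symm
  | cons c cs ih =>
      intro L hL
      have hc : c ∈ (['U','D','L','R'] : List Char) := hcs c (by simp)
      have hL' : ∀ d ∈ L.map (fun d => pvStepB d c), 1 ≤ d ∧ d ≤ 9 := by
        intro d hd
        obtain ⟨e, he, rfl⟩ := List.mem_map.mp hd
        exact (pvStepB_eq e (hL e he).1 (hL e he).2 c hc).2
      have := ih (fun x hx => hcs x (by simp [hx])) (L.map (fun d => pvStepB d c)) hL'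
      simp only [List.foldl_cons, this, List.map_map]
      refine List.map_congr_left (fun d hd => ?_)
      simp only [Function.comp, pvApplyA, List.foldl_cons,
        (pvStepB_eq d (hL d hd).1 (hL d hd).2 c hc).1]

lemma pvRange9 : PySem.List.pyRange 1 10 1 = [1, 2, 3, 4, 5, 6, 7, 8, 9] := by decide

lemma pvTableB_eq (s : String) (hcs : ∀ c ∈ s.toList, c ∈ (['U','D','L','R'] : List Char)) :
    pvTableB s = [1, 2, 3, 4, 5, 6, 7, 8, 9].map (pvApplyA s.toList) := by
  unfold pvTableB
  rw [pvRange9, pvTable_fold s.toList hcs _ (by decide)]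

-- looking up cur-1 in a mapped 1..9 table returns f cur
lemma pvIdx9 (f : Int → Int) (cur : Int) (h1 : 1 ≤ cur) (h9 : cur ≤ 9) :
    (PySem.List.pyGet? ([1, 2, 3, 4, 5, 6, 7, 8, 9].map f) (cur - 1)).getD 0 = f cur := by
  interval_cases cur <;>
    simp [PySem.List.pyGet?, PySem.List.pyIdx?, List.map]

-- A's per-sequence result stays inside 1..9 on valid sequences
lemma pvApplyA_range (cs : List Char) (hcs : ∀ c ∈ cs, c ∈ (['U','D','L','R'] : List Char)) :
    ∀ d, 1 ≤ d → d ≤ 9 → 1 ≤ pvApplyA cs d ∧ pvApplyA cs d ≤ 9 := by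
  induction cs with
  | nil => intro d h1 h9; exact ⟨h1, h9⟩
  | cons c cs ih =>
      intro d h1 h9
      have hc := pvStepB_eq d h1 h9 c (hcs c (by simp))
      have : pvApplyA (c :: cs) d = pvApplyA cs (get_position c d) := rfl
      rw [this, ← hc.1]
      exact ih (fun x hx => hcs x (by simp [hx])) _ hc.2.1 hc.2.2

-- Stage-2 chaining over the tables equals A's threaded loop
lemma pvChain_eq (tups : List String)
    (h : ∀ s ∈ tups, ∀ c ∈ s.toList, c ∈ (['U','D','L','R'] : List Char)) :
    ∀ cur, 1 ≤ cur → cur ≤ 9 →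
      pvChainB (tups.map pvTableB) cur = pvGetPinLoopA tups cur := by
  induction tups with
  | nil => intro cur _ _; rfl
  | cons s rest ih =>
      intro cur h1 h9
      have hs := h s (by simp)
      have hcur' : (PySem.List.pyGet? (pvTableB s) (cur - 1)).getD 0 = get_digit s cur := by
        rw [pvTableB_eq s hs, pvIdx9 _ cur h1 h9]; rfl
      have hrange := pvApplyA_range s.toList hs cur h1 h9
      simp only [List.map_cons, pvChainB, pvGetPinLoopA, hcur']
      exact congrArg _ (ih (fun t ht => h t (by simp [ht])) (get_digit s cur)
        hrange.1 hrange.2)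

lemma pvValidA (tup : List String) (hp : Pre_get_pin tup) :
    ((tup.all fun s => s.toList.all fun c => decide (c ∈ (['U','D','L','R'] : List Char))) &&
     (decide (4 ≤ tup.length) && decide (tup.length ≤ 10)) &&
     (tup.all fun s => decide (1 ≤ PySem.Str.len s) && PySem.Str.strIsalpha s)) = true := by
  obtain ⟨h1, h2, h3⟩ := pvPre_elim tup hp
  simp only [Bool.and_eq_true, List.all_eq_true, decide_eq_true_eq]
  refine ⟨⟨fun s hs => fun c hc => (h3 s hs).2 c hc, h1, h2⟩, fun s hs => ?_⟩
  obtain ⟨hne, hcs⟩ := h3 s hs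
  constructor
  · simp only [PySem.Str.len]
    have : s.toList.length ≠ 0 := fun h => hne (List.length_eq_zero_iff.mp h)
    omega
  · simp only [PySem.Str.strIsalpha_eq, PySem.Chars.strIsalpha]
    simp only [Bool.and_eq_true, List.all_eq_true]
    refine ⟨by simpa using hne, fun c hc => ?_⟩
    have h := hcs c hc
    fin_cases h <;> decide

lemma pvValidB (tup : List String) (hp : Pre_get_pin tup) :
    ((decide (4 ≤ tup.length) && decide (tup.length ≤ 10)) &&
     (tup.all fun s => !s.toList.isEmpty && (s.toList.all fun c => decide (c ∈ (['U','D','L','R'] : List Char))))) = true := by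
  obtain ⟨h1, h2, h3⟩ := pvPre_elim tup hp
  simp only [Bool.and_eq_true, List.all_eq_true, decide_eq_true_eq]
  refine ⟨⟨h1, h2⟩, fun s hs => ⟨?_, fun c hc => (h3 s hs).2 c hc⟩⟩
  simpa using (h3 s hs).1

-- ===== VERDICT (by name: the statement is the Claim_ definition above) =====
theorem get_pin_spec : Claim_equal_get_pin := by
  intro tup _ hpre
  unfold Spec_get_pin get_pin get_pin_alt
  rw [if_pos (pvValidA tup hpre), if_pos (pvValidB tup hpre)]
  exact (pvChain_eq tup (fun s hs => ((pvPre_elim tup hpre).2.2 s hs).2) 5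
    (by norm_num) (by norm_num)).symm
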